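-- pv_equiv track=rewrite | github.com/kv-ops/automl-platform | automl_platform/monitoring.py | _compatible_types
-- ===== SOURCE A (Python) =====
-- def _compatible_types(actual: str, expected: str) -> bool:
--     """Check if data types are compatible"""
--     compatible_pairs = [
--         ("int64", "float64"),
--         ("int32", "int64"),
--         ("float32", "float64"),
--         ("object", "string")
--     ]
--
--     if actual == expected:
--         return True
--
--     for pair in compatible_pairs:
--         if (actual in pair and expected in pair):
--             return True
--
--     return False
-- ===== SOURCE B (Python) =====
-- def _parse(t):
--     """Split a numeric dtype name into (family, width); None if not one."""
--     if t.startswith("int"):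
--         kind, rest = "int", t[3:]
--     elif t.startswith("float"):
--         kind, rest = "float", t[5:]
--     else:
--         return None
--     if rest not in ("32", "64"):
--         return None
--     return kind, rest
--
-- def _compatible_types(actual: str, expected: str) -> bool:
--     """Check if data types are compatible"""
--     if actual == expected:
--         return True
--     if actual in ("object", "string"):
--         return expected in ("object", "string")
--     pa = _parse(actual)
--     pe = _parse(expected)
--     if pa is None or pe is None:
--         return False
--     if pa[0] == pe[0]:
--         return True
--     return pa[1] == "64" and pe[1] == "64"
-- ===== Notes on version B (the rewrite author's own statement) =====
-- stated objective: alternative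
-- what changed: Instead of scanning a table of compatible pairs, B parses each dtype name into a (family, width) pair via startswith/suffix checks and decides compatibility by rule: equal names, object/string interchange, same numeric family (widening), or cross int/float at width 64.
import Mathlib
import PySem

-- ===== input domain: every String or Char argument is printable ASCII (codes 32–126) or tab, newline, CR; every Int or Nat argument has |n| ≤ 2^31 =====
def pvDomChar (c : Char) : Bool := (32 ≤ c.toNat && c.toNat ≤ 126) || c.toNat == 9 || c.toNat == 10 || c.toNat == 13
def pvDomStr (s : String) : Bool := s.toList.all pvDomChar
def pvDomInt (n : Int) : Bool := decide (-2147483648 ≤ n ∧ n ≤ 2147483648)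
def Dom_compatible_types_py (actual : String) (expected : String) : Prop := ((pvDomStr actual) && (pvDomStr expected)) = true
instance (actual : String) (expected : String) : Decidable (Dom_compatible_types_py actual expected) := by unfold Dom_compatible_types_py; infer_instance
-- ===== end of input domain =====

-- B parses each dtype name into (family, width) and decides compatibility by rule,
-- instead of A's scan over a table of compatible pairs (alternative algorithm, same cost).

-- ===== PORT A =====
-- A's local list of compatible pairs
def compatPairsA : List (String × String) :=
  [("int64", "float64"), ("int32", "int64"), ("float32", "float64"), ("object", "string")]

-- the for-loop with early return: first pair containing both strings → True, else False
def loopA (a e : String) : List (String × String) → Bool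
  | [] => false
  | p :: rest =>
      if (a == p.1 || a == p.2) && (e == p.1 || e == p.2) then true
      else loopA a e rest

def compatible_types_py (actual : String) (expected : String) : Bool :=
  if actual == expected then true
  else loopA actual expected compatPairsA

-- ===== PORT B =====
-- _parse: startswith + suffix slice, then the suffix must be "32" or "64"
def parseB (t : String) : Option (String × String) :=
  let kr : Option (String × String) :=
    if PySem.Str.startswith t "int" then some ("int", PySem.Str.slice t (some 3) none)
    else if PySem.Str.startswith t "float" then some ("float", PySem.Str.slice t (some 5) none)
    else none
  match kr with
  | none => none
  | some (kind, rest) =>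
      if ¬ (rest == "32" || rest == "64") then none
      else some (kind, rest)

def compatible_types_py_alt (actual : String) (expected : String) : Bool :=
  if actual == expected then true
  else if actual == "object" || actual == "string" then
    expected == "object" || expected == "string"
  else
    match parseB actual, parseB expected with
    | some pa, some pe =>
        if pa.1 == pe.1 then true
        else pa.2 == "64" && pe.2 == "64"
    | _, _ => false

-- ===== PRECONDITION & SPEC =====
def Spec_compatible_types_py (actual : String) (expected : String) (out : Bool) : Prop := out = compatible_types_py_alt actual expected
instance (actual : String) (expected : String) (out : Bool) : Decidable (Spec_compatible_types_py actual expected out) := by unfold Spec_compatible_types_py; infer_instance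

-- ===== CLAIM (what is proved, stated in full; the proofs are below) =====
def Claim_equal_compatible_types_py : Prop := ∀ (actual : String) (expected : String), Dom_compatible_types_py actual expected → Spec_compatible_types_py actual expected (compatible_types_py actual expected)

-- ===== LEMMAS AND PROOFS =====

-- startswith p + slicing off |p| characters reconstructs the string
theorem recon (t p : String) (h : PySem.Str.startswith t p = true) :
    t.toList = p.toList ++ (PySem.Str.slice t (some (p.toList.length : Int)) none).toList := by
  simp [PySem.Str.startswith] at h
  rw [PySem.Chars.startswith_iff] at h
  obtain ⟨r, hr⟩ := h
  simp [PySem.Str.slice, ← hr]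

theorem recon_int (t : String) (h : PySem.Str.startswith t "int" = true) :
    t.toList = 'i' :: 'n' :: 't' :: (PySem.Str.slice t (some 3) none).toList := by
  have h2 := recon t "int" h
  simpa using h2

theorem recon_float (t : String) (h : PySem.Str.startswith t "float" = true) :
    t.toList = 'f' :: 'l' :: 'o' :: 'a' :: 't' :: (PySem.Str.slice t (some 5) none).toList := by
  have h2 := recon t "float" h
  simpa using h2

-- B's parser accepts exactly the four numeric dtype names
theorem parseB_eq (t : String) :
    parseB t =
      if t = "int32" then some ("int", "32")
      else if t = "int64" then some ("int", "64")
      else if t = "float32" then some ("float", "32")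
      else if t = "float64" then some ("float", "64")
      else none := by
  by_cases h1 : t = "int32"; · subst h1; decide
  by_cases h2 : t = "int64"; · subst h2; decide
  by_cases h3 : t = "float32"; · subst h3; decide
  by_cases h4 : t = "float64"; · subst h4; decide
  simp only [h1, h2, h3, h4, if_false]
  unfold parseB
  by_cases hi : PySem.Str.startswith t "int" = true
  · have hr := recon_int t hi
    simp only [hi, if_true]
    have e32 : (PySem.Str.slice t (some 3) none) ≠ "32" := by
      intro he; apply h1; apply String.toList_inj.mp; rw [hr, he]; decide
    have e64 : (PySem.Str.slice t (some 3) none) ≠ "64" := by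
      intro he; apply h2; apply String.toList_inj.mp; rw [hr, he]; decide
    simp [e32, e64]
  · by_cases hf : PySem.Str.startswith t "float" = true
    · have hr := recon_float t hf
      simp only [Bool.not_eq_true] at hi
      simp only [hi, hf, if_true, Bool.false_eq_true, if_false]
      have e32 : (PySem.Str.slice t (some 5) none) ≠ "32" := by
        intro he; apply h3; apply String.toList_inj.mp; rw [hr, he]; decide
      have e64 : (PySem.Str.slice t (some 5) none) ≠ "64" := by
        intro he; apply h4; apply String.toList_inj.mp; rw [hr, he]; decide
      simp [e32, e64]
    · simp [PySem.Str.startswith] at hi hf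
      simp [hi, hf]

-- ===== VERDICT (by name: the statement is the Claim_ definition above) =====
theorem compatible_types_py_spec : Claim_equal_compatible_types_py := by
  intro a e _
  show compatible_types_py a e = compatible_types_py_alt a e
  unfold compatible_types_py compatible_types_py_alt
  rw [parseB_eq, parseB_eq]
  by_cases hae : a = e
  · simp [hae]
  · simp only [beq_iff_eq, hae, if_false]
    by_cases h1 : a = "int32"
    · subst h1; simp [loopA, compatPairsA]; split_ifs <;> simp_all
    by_cases h2 : a = "int64"
    · subst h2; simp [loopA, compatPairsA]; split_ifs <;> simp_all
    by_cases h3 : a = "float32"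
    · subst h3; simp [loopA, compatPairsA]; split_ifs <;> simp_all
    by_cases h4 : a = "float64"
    · subst h4; simp [loopA, compatPairsA]; split_ifs <;> simp_all
    by_cases h5 : a = "object"
    · subst h5; simp [loopA, compatPairsA]
      by_cases ho : e = "object" <;> by_cases hs : e = "string" <;> simp_all
    by_cases h6 : a = "string"
    · subst h6; simp [loopA, compatPairsA]
      by_cases ho : e = "object" <;> by_cases hs : e = "string" <;> simp_all
    simp [loopA, compatPairsA, h1, h2, h3, h4, h5, h6]
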